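-- pv_equiv track=rewrite | github.com/murr2k/linknode-security-tester | src/integrations/zap_client.py | _process_alerts
-- ===== SOURCE A (Python) =====
-- from typing import Dict, List, Optional, Any
--
-- def _process_alerts(alerts: List[Dict[str, Any]]) -> List[Dict[str, Any]]:
--     """Process and categorize alerts."""
--     processed_alerts = []
--
--     for alert in alerts:
--         processed_alert = {
--             'id': alert.get('alertRef'),
--             'name': alert.get('name'),
--             'risk': alert.get('risk'),
--             'confidence': alert.get('confidence'),
--             'description': alert.get('description'),
--             'solution': alert.get('solution'),
--             'reference': alert.get('reference'),
--             'url': alert.get('url'),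
--             'method': alert.get('method'),
--             'param': alert.get('param'),
--             'attack': alert.get('attack'),
--             'evidence': alert.get('evidence'),
--             'other': alert.get('other'),
--             'cwe_id': alert.get('cweid'),
--             'wasc_id': alert.get('wascid'),
--             'source_id': alert.get('sourceid')
--         }
--         processed_alerts.append(processed_alert)
--
--     # Sort by risk level
--     risk_order = {'High': 0, 'Medium': 1, 'Low': 2, 'Informational': 3}
--     processed_alerts.sort(
--         key=lambda x: risk_order.get(x['risk'], 4)
--     )
--
--     return processed_alerts
-- ===== SOURCE B (Python) =====
-- from typing import Dict, List, Optional, Any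
--
-- def _process_alerts(alerts: List[Dict[str, Any]]) -> List[Dict[str, Any]]:
--     """Process and categorize alerts in one pass: map fields, drop each
--     mapped alert into its risk bucket, then concatenate the buckets."""
--     high, medium, low, info, unknown = [], [], [], [], []
--     route = {'High': high, 'Medium': medium, 'Low': low, 'Informational': info}
--     for alert in alerts:
--         processed = {
--             'id': alert.get('alertRef'),
--             'name': alert.get('name'),
--             'risk': alert.get('risk'),
--             'confidence': alert.get('confidence'),
--             'description': alert.get('description'),
--             'solution': alert.get('solution'),
--             'reference': alert.get('reference'),
--             'url': alert.get('url'),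
--             'method': alert.get('method'),
--             'param': alert.get('param'),
--             'attack': alert.get('attack'),
--             'evidence': alert.get('evidence'),
--             'other': alert.get('other'),
--             'cwe_id': alert.get('cweid'),
--             'wasc_id': alert.get('wascid'),
--             'source_id': alert.get('sourceid')
--         }
--         bucket = route.get(alert.get('risk'), unknown)
--         bucket.append(processed)
--     return high + medium + low + info + unknown
-- ===== Notes on version B (the rewrite author's own statement) =====
-- stated objective: alternative
-- what changed: Replaces map-then-stable-comparison-sort with a single pass that maps each alert and appends it to one of five risk buckets (High/Medium/Low/Informational/unknown), returning the buckets concatenated in order.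
import Mathlib
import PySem

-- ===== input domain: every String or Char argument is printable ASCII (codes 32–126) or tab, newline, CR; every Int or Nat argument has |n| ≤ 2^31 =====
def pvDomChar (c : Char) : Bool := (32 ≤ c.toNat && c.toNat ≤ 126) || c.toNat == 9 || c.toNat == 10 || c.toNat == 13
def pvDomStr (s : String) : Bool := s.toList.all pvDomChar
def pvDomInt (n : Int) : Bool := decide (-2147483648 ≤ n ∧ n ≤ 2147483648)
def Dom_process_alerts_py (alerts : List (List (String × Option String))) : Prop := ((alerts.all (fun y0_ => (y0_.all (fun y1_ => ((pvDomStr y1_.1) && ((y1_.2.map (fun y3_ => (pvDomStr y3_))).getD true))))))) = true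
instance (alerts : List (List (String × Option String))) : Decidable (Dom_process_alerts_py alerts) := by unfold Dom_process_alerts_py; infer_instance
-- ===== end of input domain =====

-- B replaces the stable sort by risk level with a single mapping pass into five
-- risk buckets concatenated at the end (alternative decomposition, same result).

-- ===== PORT A =====
-- alert.get(k): first-match lookup in the assoc list, None when missing
-- (the value type is already Optional[str], so missing and None coincide).
def pvGetN (d : List (String × Option String)) (k : String) : Option String :=
  match d with
  | [] => none
  | (k', v) :: t => if k' == k then v else pvGetN t k

-- the 16-field renaming applied to one alert (shared literal data of A and B)
def pvMapAlert (alert : List (String × Option String)) : List (String × Option String) :=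
  [("id", pvGetN alert "alertRef"),
   ("name", pvGetN alert "name"),
   ("risk", pvGetN alert "risk"),
   ("confidence", pvGetN alert "confidence"),
   ("description", pvGetN alert "description"),
   ("solution", pvGetN alert "solution"),
   ("reference", pvGetN alert "reference"),
   ("url", pvGetN alert "url"),
   ("method", pvGetN alert "method"),
   ("param", pvGetN alert "param"),
   ("attack", pvGetN alert "attack"),
   ("evidence", pvGetN alert "evidence"),
   ("other", pvGetN alert "other"),
   ("cwe_id", pvGetN alert "cweid"),
   ("wasc_id", pvGetN alert "wascid"),
   ("source_id", pvGetN alert "sourceid")]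

-- risk_order.get(r, 4) for r = x['risk'] : Option String
def pvRiskOrderGet (r : Option String) : Int :=
  if r == some "High" then 0
  else if r == some "Medium" then 1
  else if r == some "Low" then 2
  else if r == some "Informational" then 3
  else 4

-- the sort key; 'risk' is always present in a mapped alert, so the
-- first-match lookup is exactly x['risk']
def pvKey (x : List (String × Option String)) : Int := pvRiskOrderGet (pvGetN x "risk")

def process_alerts_py (alerts : List (List (String × Option String))) : List (List (String × Option String)) :=
  let processed := alerts.foldl (fun acc alert => acc ++ [pvMapAlert alert]) []
  PySem.List.sorted processed pvKey false

-- ===== PORT B =====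
-- route.get(alert.get('risk'), unknown).append(processed): the five buckets as a tuple
def pvRoute (st : List (List (String × Option String)) × List (List (String × Option String)) ×
                  List (List (String × Option String)) × List (List (String × Option String)) ×
                  List (List (String × Option String)))
    (r : Option String) (p : List (String × Option String)) :
    List (List (String × Option String)) × List (List (String × Option String)) ×
    List (List (String × Option String)) × List (List (String × Option String)) ×
    List (List (String × Option String)) :=
  match st with
  | (h, m, l, i, u) =>
    if r == some "High" then (h ++ [p], m, l, i, u)
    else if r == some "Medium" then (h, m ++ [p], l, i, u)
    else if r == some "Low" then (h, m, l ++ [p], i, u)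
    else if r == some "Informational" then (h, m, l, i ++ [p], u)
    else (h, m, l, i, u ++ [p])

def process_alerts_py_alt (alerts : List (List (String × Option String))) : List (List (String × Option String)) :=
  let st := alerts.foldl (fun st alert => pvRoute st (pvGetN alert "risk") (pvMapAlert alert)) ([], [], [], [], [])
  st.1 ++ st.2.1 ++ st.2.2.1 ++ st.2.2.2.1 ++ st.2.2.2.2

-- ===== PRECONDITION & SPEC =====
def Spec_process_alerts_py (alerts : List (List (String × Option String))) (out : List (List (String × Option String))) : Prop := out = process_alerts_py_alt alerts
instance (alerts : List (List (String × Option String))) (out : List (List (String × Option String))) : Decidable (Spec_process_alerts_py alerts out) := by unfold Spec_process_alerts_py; infer_instance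

-- ===== CLAIM (what is proved, stated in full; the proofs are below) =====
def Claim_equal_process_alerts_py : Prop := ∀ (alerts : List (List (String × Option String))), Dom_process_alerts_py alerts → Spec_process_alerts_py alerts (process_alerts_py alerts)

-- ===== LEMMAS AND PROOFS =====

theorem pv_foldl_append_eq_map {α β : Type} (f : α → β) (l : List α) (acc : List β) :
    l.foldl (fun acc a => acc ++ [f a]) acc = acc ++ l.map f := by
  induction l generalizing acc with
  | nil => simp
  | cons x t ih => simp [List.foldl_cons, ih]

-- stable insertion into P ++ S when x goes after all of P and before all of S
theorem pv_insertBy_split {α : Type} (before : α → α → Bool) (x : α) (P S : List α)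
    (hP : ∀ p ∈ P, before x p = false) (hS : ∀ s ∈ S, before x s = true) :
    PySem.List.insertBy before x (P ++ S) = P ++ x :: S := by
  induction P with
  | nil =>
    cases S with
    | nil => rfl
    | cons s t => simp [PySem.List.insertBy, hS s (by simp)]
  | cons p t ih =>
    have hp := hP p (by simp)
    simp only [List.cons_append, PySem.List.insertBy, hp]
    simp [ih (fun q hq => hP q (by simp [hq]))]

-- the stable sort by a key with values in {0,…,4} is the concatenation of the key buckets
theorem pv_sorted_buckets {α : Type} (key : α → Int) (hk : ∀ x : α, 0 ≤ key x ∧ key x ≤ 4)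
    (l : List α) :
    PySem.List.sorted l key false =
      l.filter (fun x => key x == 0) ++ l.filter (fun x => key x == 1) ++
      l.filter (fun x => key x == 2) ++ l.filter (fun x => key x == 3) ++
      l.filter (fun x => key x == 4) := by
  induction l using List.reverseRecOn with
  | nil => rfl
  | append_singleton M x ih =>
    have hb := hk x
    have key5 : key x = 0 ∨ key x = 1 ∨ key x = 2 ∨ key x = 3 ∨ key x = 4 := by omega
    rw [PySem.List.sorted_eq_foldl_insertBy, List.foldl_append, ← PySem.List.sorted_eq_foldl_insertBy, ih]
    simp only [List.foldl_cons, List.foldl_nil]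
    have hmem : ∀ (c : Int) (p : α), p ∈ M.filter (fun y => key y == c) → key p = c := by
      intro c p hp
      have := (List.mem_filter.1 hp).2
      exact beq_iff_eq.1 this
    have step : ∀ (P S : List α), (∀ p ∈ P, key p ≤ key x) → (∀ s ∈ S, key x < key s) →
        PySem.List.insertBy (fun a b => decide (key a < key b)) x (P ++ S) = P ++ x :: S := by
      intro P S hP hS
      refine pv_insertBy_split _ _ _ _ (fun p hp => ?_) (fun s hs => ?_)
      · have := hP p hp; simp only [decide_eq_false_iff_not]; omega
      · have := hS s hs; simp only [decide_eq_true_eq]; omega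
    rcases key5 with hc|hc|hc|hc|hc
    · have h := step (M.filter (fun y => key y == 0))
        (M.filter (fun y => key y == 1) ++ M.filter (fun y => key y == 2) ++
         M.filter (fun y => key y == 3) ++ M.filter (fun y => key y == 4))
        (fun p hp => by have := hmem 0 p hp; omega)
        (fun s hs => by
          rcases List.mem_append.1 hs with hs | h4
          · rcases List.mem_append.1 hs with hs | h3
            · rcases List.mem_append.1 hs with h1 | h2
              · have := hmem 1 s h1; omega
              · have := hmem 2 s h2; omega
            · have := hmem 3 s h3; omega
          · have := hmem 4 s h4; omega)
      simp only [List.append_assoc] at h ⊢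
      rw [h]
      simp [List.filter_append, hc]
    · have h := step (M.filter (fun y => key y == 0) ++ M.filter (fun y => key y == 1))
        (M.filter (fun y => key y == 2) ++ M.filter (fun y => key y == 3) ++ M.filter (fun y => key y == 4))
        (fun p hp => by
          rcases List.mem_append.1 hp with h0 | h1
          · have := hmem 0 p h0; omega
          · have := hmem 1 p h1; omega)
        (fun s hs => by
          rcases List.mem_append.1 hs with hs | h4
          · rcases List.mem_append.1 hs with h2 | h3
            · have := hmem 2 s h2; omega
            · have := hmem 3 s h3; omega
          · have := hmem 4 s h4; omega)
      simp only [List.append_assoc] at h ⊢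
      rw [h]
      simp [List.filter_append, hc]
    · have h := step (M.filter (fun y => key y == 0) ++ M.filter (fun y => key y == 1) ++ M.filter (fun y => key y == 2))
        (M.filter (fun y => key y == 3) ++ M.filter (fun y => key y == 4))
        (fun p hp => by
          rcases List.mem_append.1 hp with hp | h2
          · rcases List.mem_append.1 hp with h0 | h1
            · have := hmem 0 p h0; omega
            · have := hmem 1 p h1; omega
          · have := hmem 2 p h2; omega)
        (fun s hs => by
          rcases List.mem_append.1 hs with h3 | h4
          · have := hmem 3 s h3; omega
          · have := hmem 4 s h4; omega)
      simp only [List.append_assoc] at h ⊢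
      rw [h]
      simp [List.filter_append, hc]
    · have h := step (M.filter (fun y => key y == 0) ++ M.filter (fun y => key y == 1) ++
          M.filter (fun y => key y == 2) ++ M.filter (fun y => key y == 3))
        (M.filter (fun y => key y == 4))
        (fun p hp => by
          rcases List.mem_append.1 hp with hp | h3
          · rcases List.mem_append.1 hp with hp | h2
            · rcases List.mem_append.1 hp with h0 | h1
              · have := hmem 0 p h0; omega
              · have := hmem 1 p h1; omega
            · have := hmem 2 p h2; omega
          · have := hmem 3 p h3; omega)
        (fun s hs => by have := hmem 4 s hs; omega)
      simp only [List.append_assoc] at h ⊢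
      rw [h]
      simp [List.filter_append, hc]
    · have h := step (M.filter (fun y => key y == 0) ++ M.filter (fun y => key y == 1) ++
          M.filter (fun y => key y == 2) ++ M.filter (fun y => key y == 3) ++ M.filter (fun y => key y == 4))
        []
        (fun p hp => by
          rcases List.mem_append.1 hp with hp | h4
          · rcases List.mem_append.1 hp with hp | h3
            · rcases List.mem_append.1 hp with hp | h2
              · rcases List.mem_append.1 hp with h0 | h1
                · have := hmem 0 p h0; omega
                · have := hmem 1 p h1; omega
              · have := hmem 2 p h2; omega
            · have := hmem 3 p h3; omega
          · have := hmem 4 p h4; omega)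
        (fun s hs => by simp at hs)
      simp only [List.append_nil] at h
      simp only [List.append_assoc] at h ⊢
      rw [h]
      simp [List.filter_append, hc]

theorem pv_key_mapAlert (a : List (String × Option String)) :
    pvKey (pvMapAlert a) = pvRiskOrderGet (pvGetN a "risk") := by
  simp [pvKey, pvMapAlert, pvGetN]

theorem pv_alt_inv (alerts : List (List (String × Option String)))
    (h m l i u : List (List (String × Option String))) :
    alerts.foldl (fun st alert => pvRoute st (pvGetN alert "risk") (pvMapAlert alert)) (h, m, l, i, u) =
      (h ++ (alerts.filter (fun a => pvRiskOrderGet (pvGetN a "risk") == 0)).map pvMapAlert,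
       m ++ (alerts.filter (fun a => pvRiskOrderGet (pvGetN a "risk") == 1)).map pvMapAlert,
       l ++ (alerts.filter (fun a => pvRiskOrderGet (pvGetN a "risk") == 2)).map pvMapAlert,
       i ++ (alerts.filter (fun a => pvRiskOrderGet (pvGetN a "risk") == 3)).map pvMapAlert,
       u ++ (alerts.filter (fun a => pvRiskOrderGet (pvGetN a "risk") == 4)).map pvMapAlert) := by
  induction alerts generalizing h m l i u with
  | nil => simp
  | cons a t ih =>
    by_cases h0 : pvGetN a "risk" = some "High"
    · have hr : pvRoute (h, m, l, i, u) (pvGetN a "risk") (pvMapAlert a) = (h ++ [pvMapAlert a], m, l, i, u) := by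
        simp [pvRoute, h0]
      rw [List.foldl_cons, hr, ih]
      simp [pvRiskOrderGet, h0]
    · by_cases h1 : pvGetN a "risk" = some "Medium"
      · have hr : pvRoute (h, m, l, i, u) (pvGetN a "risk") (pvMapAlert a) = (h, m ++ [pvMapAlert a], l, i, u) := by
          simp [pvRoute, h1]
        rw [List.foldl_cons, hr, ih]
        simp [pvRiskOrderGet, h1]
      · by_cases h2 : pvGetN a "risk" = some "Low"
        · have hr : pvRoute (h, m, l, i, u) (pvGetN a "risk") (pvMapAlert a) = (h, m, l ++ [pvMapAlert a], i, u) := by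
            simp [pvRoute, h2]
          rw [List.foldl_cons, hr, ih]
          simp [pvRiskOrderGet, h2]
        · by_cases h3 : pvGetN a "risk" = some "Informational"
          · have hr : pvRoute (h, m, l, i, u) (pvGetN a "risk") (pvMapAlert a) = (h, m, l, i ++ [pvMapAlert a], u) := by
              simp [pvRoute, h3]
            rw [List.foldl_cons, hr, ih]
            simp [pvRiskOrderGet, h3]
          · have hr : pvRoute (h, m, l, i, u) (pvGetN a "risk") (pvMapAlert a) = (h, m, l, i, u ++ [pvMapAlert a]) := by
              simp [pvRoute, h0, h1, h2, h3]
            rw [List.foldl_cons, hr, ih]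
            simp [pvRiskOrderGet, h0, h1, h2, h3]

-- ===== VERDICT (by name: the statement is the Claim_ definition above) =====
theorem process_alerts_py_spec : Claim_equal_process_alerts_py := by
  intro alerts _
  unfold Spec_process_alerts_py process_alerts_py process_alerts_py_alt
  rw [pv_foldl_append_eq_map, pv_alt_inv]
  have hk : ∀ x : List (String × Option String), 0 ≤ pvKey x ∧ pvKey x ≤ 4 := by
    intro x
    unfold pvKey pvRiskOrderGet
    split_ifs <;> omega
  rw [pv_sorted_buckets pvKey hk]
  have hfilt : ∀ (c : Int),
      (alerts.map pvMapAlert).filter (fun x => pvKey x == c) =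
        (alerts.filter (fun a => pvRiskOrderGet (pvGetN a "risk") == c)).map pvMapAlert := by
    intro c
    rw [List.filter_map]
    simp only [Function.comp_def, pv_key_mapAlert]
  simp [hfilt, List.append_assoc]
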